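-- pv_equiv track=rewrite | github.com/x-atlas-consortia/ubkg-etl | generation_framework/ubkg_utilities/ubkg_parsetools.py | parenthetic_contents
-- ===== SOURCE A (Python) =====
-- def parenthetic_contents(strparen: str) -> tuple:
--
--     # Employs a stack to analyze elements in a string by level of nesting.
--     stack = []
--     for i, c in enumerate(strparen):
--         if c == '(':
--             # New level of parenthesis nesting.
--             stack.append(i)
--         elif c == ')' and stack:
--             # Closing of element at this level of nesting.
--             # Return to higher level of nesting.
--             start = stack.pop()
--             yield (len(stack), strparen[start + 1: i])
-- ===== SOURCE B (Python) =====
-- def parenthetic_contents(strparen: str) -> tuple: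
--     # Phase 1: match parentheses only, collecting (open, close) index pairs in closing order.
--     st, pairs = [], []
--     for i, c in enumerate(strparen):
--         if c == '(':
--             st.append(i)
--         elif c == ')' and st:
--             pairs.append((st.pop(), i))
--     # Phase 2: prefix counts of open parentheses turn each pair into its nesting depth arithmetically:
--     # depth = (number of opens before the close) - (number of pairs closed earlier) - 1.
--     opens = []
--     t = 0
--     for c in strparen:
--         opens.append(t)
--         t += (c == '(')
--     for k, (start, end) in enumerate(pairs):
--         yield (opens[end] - k - 1, strparen[start + 1:end])
-- ===== Notes on version B (the rewrite author's own statement) =====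
-- stated objective: alternative
-- what changed: B splits the work into a pure bracket-matching pass that only records (open,close) index pairs and then computes each pair's depth by a closed-form prefix count (opens before the close minus pairs closed earlier minus 1), instead of A's single loop that reads the depth off the live stack at every pop.
import Mathlib
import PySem

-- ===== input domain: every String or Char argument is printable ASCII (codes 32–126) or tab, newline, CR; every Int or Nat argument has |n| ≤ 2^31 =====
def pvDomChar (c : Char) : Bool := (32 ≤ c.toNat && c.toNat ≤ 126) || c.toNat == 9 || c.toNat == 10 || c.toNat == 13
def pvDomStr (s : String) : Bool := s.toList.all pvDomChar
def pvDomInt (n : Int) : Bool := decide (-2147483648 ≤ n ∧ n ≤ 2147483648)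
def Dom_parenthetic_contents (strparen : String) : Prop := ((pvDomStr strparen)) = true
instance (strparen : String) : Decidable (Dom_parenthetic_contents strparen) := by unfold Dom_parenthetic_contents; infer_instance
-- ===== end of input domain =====

-- B separates bracket matching (index pairs only) from depth computation (a prefix-count formula);
-- A reads depths off the live stack in one loop.  Objective: alternative decomposition, same O(n) cost.
-- Both Pythons are generators; equivalence is about the yielded sequence of pairs.

-- ===== PORT A =====
-- the for-loop of A as structural recursion over the characters, carrying (index, stack, yielded-so-far)
def pcAuxA (strparen : String) : List Char → Nat → List Nat → List (Int × String) → List (Int × String)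
  | [], _, _, acc => acc
  | c :: cs, i, stack, acc =>
    if c = '(' then
      pcAuxA strparen cs (i + 1) (i :: stack) acc
    else if c = ')' then
      match stack with
      | [] => pcAuxA strparen cs (i + 1) [] acc
      | start :: rest =>
          pcAuxA strparen cs (i + 1) rest
            (acc ++ [((rest.length : Int), PySem.Str.slice strparen (some ((start : Int) + 1)) (some (i : Int)))])
    else
      pcAuxA strparen cs (i + 1) stack acc

def parenthetic_contents (strparen : String) : List (Int × String) :=
  pcAuxA strparen strparen.toList 0 [] []

-- ===== PORT B =====
-- phase 1 of Source B: pure matcher, records (open, close) index pairs in closing order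
def pcAuxB : List Char → Nat → List Nat → List (Nat × Nat) → List (Nat × Nat)
  | [], _, _, pairs => pairs
  | c :: cs, i, st, pairs =>
    if c = '(' then
      pcAuxB cs (i + 1) (i :: st) pairs
    else if c = ')' then
      match st with
      | [] => pcAuxB cs (i + 1) [] pairs
      | start :: rest => pcAuxB cs (i + 1) rest (pairs ++ [(start, i)])
    else
      pcAuxB cs (i + 1) st pairs

-- phase 2 of Source B: opens[j] = number of open parentheses strictly before index j (running counter, appended each step)
def pcOpens (s : List Char) : List Nat :=
  (s.foldl (fun (p : List Nat × Nat) c => (p.1 ++ [p.2], p.2 + (if c = '(' then 1 else 0))) ([], 0)).1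

def parenthetic_contents_alt (strparen : String) : List (Int × String) :=
  let s := strparen.toList
  let pairs := pcAuxB s 0 [] []
  let opens := pcOpens s
  (PySem.List.enumerate pairs).map (fun ke =>
    ((opens.getD ke.2.2 0 : Int) - ke.1 - 1,
     PySem.Str.slice strparen (some ((ke.2.1 : Int) + 1)) (some ((ke.2.2 : Int)))))

-- ===== PRECONDITION & SPEC =====
def Spec_parenthetic_contents (strparen : String) (out : List (Int × String)) : Prop := out = parenthetic_contents_alt strparen
instance (strparen : String) (out : List (Int × String)) : Decidable (Spec_parenthetic_contents strparen out) := by unfold Spec_parenthetic_contents; infer_instance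

-- ===== CLAIM (what is proved, stated in full; the proofs are below) =====
def Claim_equal_parenthetic_contents : Prop := ∀ (strparen : String), Dom_parenthetic_contents strparen → Spec_parenthetic_contents strparen (parenthetic_contents strparen)

-- ===== LEMMAS AND PROOFS =====

-- number of open parentheses in a prefix
def pcCnt (t : List Char) : Nat := t.countP (fun c => decide (c = '('))

-- B's post-processing map, abbreviated
def pcEmap (strparen : String) (opens : List Nat) (pairs : List (Nat × Nat)) : List (Int × String) :=
  (PySem.List.enumerate pairs).map (fun ke =>
    ((opens.getD ke.2.2 0 : Int) - ke.1 - 1,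
     PySem.Str.slice strparen (some ((ke.2.1 : Int) + 1)) (some ((ke.2.2 : Int)))))

lemma pcOpens_foldl (s : List Char) : ∀ (l : List Nat) (t : Nat),
    (s.foldl (fun (p : List Nat × Nat) c => (p.1 ++ [p.2], p.2 + (if c = '(' then 1 else 0))) (l, t)).1
      = l ++ (List.range s.length).map (fun j => t + pcCnt (s.take j)) := by
  induction s with
  | nil => intro l t; simp
  | cons c cs ih =>
      intro l t
      simp only [List.foldl_cons, ih]
      rw [List.length_cons, List.range_succ_eq_map]
      simp only [List.map_cons, List.map_map, List.take_zero, List.append_assoc,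
        List.singleton_append, pcCnt, List.countP_nil, Nat.add_zero]
      congr 1
      congr 1
      refine List.map_congr_left fun j _ => ?_
      simp only [Function.comp_apply, List.take_succ_cons, List.countP_cons,
        decide_eq_true_eq]
      split_ifs <;> omega

lemma pcOpens_getD (s : List Char) (j : Nat) (hj : j < s.length) :
    (pcOpens s).getD j 0 = pcCnt (s.take j) := by
  unfold pcOpens
  rw [pcOpens_foldl]
  simp only [List.nil_append]
  rw [List.getD_eq_getElem?_getD]
  simp [hj]

lemma pcEmap_append (strparen : String) (opens : List Nat) (pairs : List (Nat × Nat)) (st en : Nat) :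
    pcEmap strparen opens (pairs ++ [(st, en)])
      = pcEmap strparen opens pairs
        ++ [((opens.getD en 0 : Int) - (pairs.length : Int) - 1,
             PySem.Str.slice strparen (some ((st : Int) + 1)) (some ((en : Int))))] := by
  unfold pcEmap
  rw [PySem.List.enumerate_append]
  simp [PySem.List.enumerate]

lemma pc_main (strparen : String) :
    ∀ (cs : List Char) (i : Nat) (st : List Nat) (acc : List (Int × String)) (pairs : List (Nat × Nat)),
    cs = strparen.toList.drop i →
    st.length + pairs.length = pcCnt (strparen.toList.take i) →
    acc = pcEmap strparen (pcOpens strparen.toList) pairs →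
    pcAuxA strparen cs i st acc
      = pcEmap strparen (pcOpens strparen.toList) (pcAuxB cs i st pairs) := by
  intro cs
  induction cs with
  | nil => intro i st acc pairs _ _ hacc; simpa [pcAuxA, pcAuxB] using hacc
  | cons c cs' ih =>
      intro i st acc pairs hdrop hcnt hacc
      have hi : i < strparen.toList.length := by
        by_contra h
        have hnil : strparen.toList.drop i = [] := List.drop_eq_nil_of_le (by omega)
        rw [hnil] at hdrop
        exact absurd hdrop (List.cons_ne_nil _ _)
      have hgc : strparen.toList.drop i = strparen.toList[i] :: strparen.toList.drop (i + 1) :=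
        List.drop_eq_getElem_cons hi
      rw [hgc] at hdrop
      injection hdrop with hc hcs'
      have htake : strparen.toList.take (i + 1) = strparen.toList.take i ++ [c] := by
        rw [hc, List.take_add_one, List.getElem?_eq_getElem hi]
        rfl
      have hcnt1 : pcCnt (strparen.toList.take (i + 1))
          = pcCnt (strparen.toList.take i) + (if c = '(' then 1 else 0) := by
        rw [htake]; unfold pcCnt
        rw [List.countP_append]
        simp [List.countP_cons]
      by_cases h1 : c = '('
      · simp only [pcAuxA, pcAuxB, if_pos h1]
        refine ih (i + 1) (i :: st) acc pairs hcs' ?_ hacc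
        rw [hcnt1, if_pos h1]
        simp only [List.length_cons] at hcnt ⊢
        omega
      · by_cases h2 : c = ')'
        · match st with
          | [] =>
              simp only [pcAuxA, pcAuxB, if_neg h1, if_pos h2]
              refine ih (i + 1) [] acc pairs hcs' ?_ hacc
              rw [hcnt1, if_neg h1]
              simpa using hcnt
          | start :: rest =>
              simp only [pcAuxA, pcAuxB, if_neg h1, if_pos h2]
              apply ih (i + 1) rest _ (pairs ++ [(start, i)]) hcs'
              · rw [hcnt1, if_neg h1]
                simp only [List.length_cons, List.length_append, List.length_cons,
                  List.length_nil] at hcnt ⊢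
                omega
              · have hop := pcOpens_getD strparen.toList i hi
                have h3 : rest.length + 1 + pairs.length = pcCnt (strparen.toList.take i) := by
                  simpa using hcnt
                have hval : ((rest.length : Int))
                    = ((pcOpens strparen.toList).getD i 0 : Int) - (pairs.length : Int) - 1 := by
                  rw [hop]; omega
                rw [pcEmap_append, hacc, ← hval]
        · simp only [pcAuxA, pcAuxB, if_neg h1, if_neg h2]
          refine ih (i + 1) st acc pairs hcs' ?_ hacc
          rw [hcnt1, if_neg h1]
          simpa using hcnt

-- ===== VERDICT (by name: the statement is the Claim_ definition above) =====
theorem parenthetic_contents_spec : Claim_equal_parenthetic_contents := by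
  intro strparen _
  unfold Spec_parenthetic_contents parenthetic_contents parenthetic_contents_alt
  have := pc_main strparen strparen.toList 0 [] [] [] (by simp) (by simp [pcCnt]) (by simp [pcEmap, PySem.List.enumerate])
  simpa [pcEmap] using this
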